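-- pv_equiv track=rewrite | github.com/ShivArora-Sykkuno/Data-Structure-And-Algos | CodeChef/NORMAL.py | subarr_sum_without
-- ===== SOURCE A (Python) =====
-- def subarr_sum_without(x, arr):
--     cnt = 0
--     prefix_sum = 0
--     mp = {0: 1}
--
--     for num in arr:
--         if num == x:
--             prefix_sum = 0
--             mp = {0: 1}
--         else:
--             prefix_sum += num
--             cnt += mp.get(prefix_sum, 0)
--             mp[prefix_sum] = mp.get(prefix_sum, 0) + 1
--
--     return cnt
-- ===== SOURCE B (Python) =====
-- def count_zero(seg):
--     # zero-sum subarrays of seg: those starting at index 0, plus recurse on the tail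
--     if not seg:
--         return 0
--     c = 0
--     s = 0
--     for v in seg:
--         s += v
--         if s == 0:
--             c += 1
--     return c + count_zero(seg[1:])
--
--
-- def subarr_sum_without(x, arr):
--     # split arr into maximal runs of non-x elements; count zero-sum subarrays per run
--     total = 0
--     cur = []
--     for num in arr:
--         if num == x:
--             total += count_zero(cur)
--             cur = []
--         else:
--             cur = cur + [num]
--     return total + count_zero(cur)
-- ===== Notes on version B (the rewrite author's own statement) =====
-- stated objective: alternative
-- what changed: Replaced the single-pass prefix-sum hashmap with a run-splitting strategy: arr is cut into maximal x-free runs and each run's zero-sum subarrays are counted by direct scanning of every start position (recursion on the tail), no dictionary at all.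
import Mathlib
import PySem

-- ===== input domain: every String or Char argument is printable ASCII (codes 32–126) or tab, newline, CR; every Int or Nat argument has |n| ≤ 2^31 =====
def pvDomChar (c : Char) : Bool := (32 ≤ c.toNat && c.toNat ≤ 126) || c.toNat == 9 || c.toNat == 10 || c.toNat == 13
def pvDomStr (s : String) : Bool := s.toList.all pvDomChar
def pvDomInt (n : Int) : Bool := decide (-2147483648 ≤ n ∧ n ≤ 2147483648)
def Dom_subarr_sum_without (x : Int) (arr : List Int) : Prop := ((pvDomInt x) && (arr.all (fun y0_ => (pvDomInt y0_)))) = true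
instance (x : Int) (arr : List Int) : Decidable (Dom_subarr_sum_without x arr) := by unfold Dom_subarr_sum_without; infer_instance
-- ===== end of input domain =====

-- B replaces A's single-pass prefix-sum hashmap with run-splitting plus a direct
-- per-start scan of each x-free run (alternative algorithm, no dictionary; not faster).

-- ===== PORT A =====
def subarr_sum_without (x : Int) (arr : List Int) : Int :=
  (arr.foldl
    (fun (st : Int × Int × PySem.Dict Int Int) num =>
      if num == x then
        (st.1, 0, PySem.Dict.ofList [((0 : Int), (1 : Int))])
      else
        let ps := st.2.1 + num
        (st.1 + st.2.2.getD ps 0, ps, st.2.2.insert ps (st.2.2.getD ps 0 + 1)))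
    (0, 0, PySem.Dict.ofList [((0 : Int), (1 : Int))])).1

-- ===== PORT B =====
-- inner loop of count_zero: running sum over seg, counting the zeros
def pvInner (seg : List Int) : Int :=
  (seg.foldl (fun (p : Int × Int) v =>
      (p.1 + (if p.2 + v = 0 then 1 else 0), p.2 + v)) ((0 : Int), (0 : Int))).1

def countZero : List Int → Int
  | [] => 0
  | v :: rest => pvInner (v :: rest) + countZero rest

def subarr_sum_without_alt (x : Int) (arr : List Int) : Int :=
  let st := arr.foldl
    (fun (p : Int × List Int) num =>
      if num == x then (p.1 + countZero p.2, ([] : List Int))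
      else (p.1, p.2 ++ [num]))
    ((0 : Int), ([] : List Int))
  st.1 + countZero st.2

-- ===== PRECONDITION & SPEC =====
def Spec_subarr_sum_without (x : Int) (arr : List Int) (out : Int) : Prop := out = subarr_sum_without_alt x arr
instance (x : Int) (arr : List Int) (out : Int) : Decidable (Spec_subarr_sum_without x arr out) := by unfold Spec_subarr_sum_without; infer_instance

-- ===== CLAIM (what is proved, stated in full; the proofs are below) =====
def Claim_equal_subarr_sum_without : Prop := ∀ (x : Int) (arr : List Int), Dom_subarr_sum_without x arr → Spec_subarr_sum_without x arr (subarr_sum_without x arr)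

-- ===== LEMMAS AND PROOFS =====

-- number of suffixes t of seg (including seg itself and []) with t.sum + n = 0
def suffCount : List Int → Int → Int
  | [], n => if n = 0 then 1 else 0
  | v :: rest, n => (if (v :: rest).sum + n = 0 then 1 else 0) + suffCount rest n

theorem inner_snd (seg : List Int) : ∀ (c s : Int),
    (seg.foldl (fun (p : Int × Int) v =>
      (p.1 + (if p.2 + v = 0 then 1 else 0), p.2 + v)) (c, s)).2 = s + seg.sum := by
  induction seg with
  | nil => intro c s; simp
  | cons v rest ih =>
      intro c s
      simp only [List.foldl_cons, List.sum_cons, ih]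
      ring

theorem pvInner_append (seg : List Int) (n : Int) :
    pvInner (seg ++ [n]) = pvInner seg + (if seg.sum + n = 0 then 1 else 0) := by
  unfold pvInner
  rw [List.foldl_append]
  simp [inner_snd]

theorem countZero_append (seg : List Int) (n : Int) :
    countZero (seg ++ [n]) = countZero seg + suffCount seg n := by
  induction seg with
  | nil => simp [countZero, suffCount, pvInner]
  | cons v rest ih =>
      have h : (v :: rest) ++ [n] = v :: (rest ++ [n]) := rfl
      rw [h]
      show pvInner (v :: (rest ++ [n])) + countZero (rest ++ [n]) = _
      have h2 : v :: (rest ++ [n]) = (v :: rest) ++ [n] := rfl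
      rw [h2, pvInner_append, ih]
      simp only [countZero, suffCount]
      ring

theorem suffCount_append (seg : List Int) (m k : Int) :
    suffCount (seg ++ [m]) k = suffCount seg (m + k) + (if k = 0 then 1 else 0) := by
  induction seg with
  | nil =>
      simp only [List.nil_append, suffCount, List.sum_cons, List.sum_nil]
      split_ifs <;> omega
  | cons v rest ih =>
      have h : (v :: rest) ++ [m] = v :: (rest ++ [m]) := rfl
      rw [h]
      simp only [suffCount, ih, List.sum_cons, List.sum_append, List.sum_nil]
      split_ifs <;> omega

theorem main_lemma (x : Int) (l : List Int) :
    ∀ (cnt : Int) (cur : List Int) (mp : PySem.Dict Int Int),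
    (∀ k, mp.getD k 0 = suffCount cur (k - cur.sum)) →
    (l.foldl
      (fun (st : Int × Int × PySem.Dict Int Int) num =>
        if num == x then
          (st.1, 0, PySem.Dict.ofList [((0 : Int), (1 : Int))])
        else
          let ps := st.2.1 + num
          (st.1 + st.2.2.getD ps 0, ps, st.2.2.insert ps (st.2.2.getD ps 0 + 1)))
      (cnt, cur.sum, mp)).1
    =
    (let st := l.foldl
        (fun (p : Int × List Int) num =>
          if num == x then (p.1 + countZero p.2, ([] : List Int))
          else (p.1, p.2 ++ [num]))
        (cnt - countZero cur, cur)
     st.1 + countZero st.2) := by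
  induction l with
  | nil =>
      intro cnt cur mp _
      simp only [List.foldl_nil]
      ring
  | cons num l ih =>
      intro cnt cur mp hm
      by_cases hx : num = x
      · simp only [List.foldl_cons, hx, beq_self_eq_true, if_true]
        have hD0 : ∀ k : Int,
            (PySem.Dict.ofList [((0 : Int), (1 : Int))]).getD k 0
              = suffCount ([] : List Int) (k - ([] : List Int).sum) := by
          intro k
          rw [show PySem.Dict.ofList [((0 : Int), (1 : Int))]
                = (PySem.Dict.empty : PySem.Dict Int Int).insert 0 1 from rfl,
              PySem.Dict.getD_insert]
          simp [PySem.Dict.getD_empty, suffCount]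
        have hih := ih cnt [] (PySem.Dict.ofList [((0 : Int), (1 : Int))]) hD0
        simp only [List.sum_nil, countZero, sub_zero] at hih
        rw [show cnt - countZero cur + countZero cur = cnt by ring]
        exact hih
      · have hbx : (num == x) = false := by simp [hx]
        simp only [List.foldl_cons, hbx, Bool.false_eq_true, if_false]
        have hS : (cur ++ [num]).sum = cur.sum + num := by
          simp [List.sum_append]
        have hkey : mp.getD (cur.sum + num) 0 = suffCount cur num := by
          rw [hm]; congr 1; ring
        have hins : ∀ k : Int,
            (mp.insert (cur.sum + num) (suffCount cur num + 1)).getD k 0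
              = suffCount (cur ++ [num]) (k - (cur ++ [num]).sum) := by
          intro k
          rw [PySem.Dict.getD_insert, suffCount_append, hS]
          by_cases hk : k = cur.sum + num
          · subst hk
            rw [if_pos rfl,
                show cur.sum + num - (cur.sum + num) = 0 by ring]
            simp [show num + (0:Int) = num by ring]
          · rw [if_neg hk, hm,
                if_neg (show ¬ (k - (cur.sum + num) = 0) by omega),
                show num + (k - (cur.sum + num)) = k - cur.sum by ring]
            ring
        have hih := ih (cnt + suffCount cur num) (cur ++ [num])
          (mp.insert (cur.sum + num) (suffCount cur num + 1)) hins
        rw [hS] at hih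
        rw [show cnt + suffCount cur num - countZero (cur ++ [num])
              = cnt - countZero cur from by rw [countZero_append]; ring] at hih
        rw [hkey]
        exact hih

-- ===== VERDICT (by name: the statement is the Claim_ definition above) =====
theorem subarr_sum_without_spec : Claim_equal_subarr_sum_without := by
  intro x arr _
  unfold Spec_subarr_sum_without subarr_sum_without subarr_sum_without_alt
  have h := main_lemma x arr 0 [] (PySem.Dict.ofList [((0 : Int), (1 : Int))]) ?_
  · simpa [countZero] using h
  · intro k
    simp only [suffCount, List.sum_nil, sub_zero]
    rw [show PySem.Dict.ofList [((0 : Int), (1 : Int))]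
          = (PySem.Dict.empty : PySem.Dict Int Int).insert 0 1 from rfl,
        PySem.Dict.getD_insert]
    simp [PySem.Dict.getD_empty]
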